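-- pv_equiv track=rewrite | github.com/Reemostat/Rl_Multi_Agent_Code_Optimizer | experiments/dataset/sample_097.py | create_nested_1
-- ===== SOURCE A (Python) =====
-- def create_nested_1(size):
--     result = []
--     for i in range(size):
--         inner = []
--         for j in range(size):
--             inner.append(i * j)
--         result.append(inner)
--     return result
-- ===== SOURCE B (Python) =====
-- def create_nested_1(size):
--     result = []
--     prev = [0] * size
--     base = list(range(size))
--     for _ in range(size):
--         result.append(prev)
--         prev = [p + b for p, b in zip(prev, base)]
--     return result
-- ===== Notes on version B (the rewrite author's own statement) =====
-- stated objective: alternative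
-- what changed: Replaces the nested multiplication loops by a running-row accumulator: row i is obtained by element-wise adding the base row [0..size-1] to the previous row, so no multiplication and no inner index loop is performed.
import Mathlib
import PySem

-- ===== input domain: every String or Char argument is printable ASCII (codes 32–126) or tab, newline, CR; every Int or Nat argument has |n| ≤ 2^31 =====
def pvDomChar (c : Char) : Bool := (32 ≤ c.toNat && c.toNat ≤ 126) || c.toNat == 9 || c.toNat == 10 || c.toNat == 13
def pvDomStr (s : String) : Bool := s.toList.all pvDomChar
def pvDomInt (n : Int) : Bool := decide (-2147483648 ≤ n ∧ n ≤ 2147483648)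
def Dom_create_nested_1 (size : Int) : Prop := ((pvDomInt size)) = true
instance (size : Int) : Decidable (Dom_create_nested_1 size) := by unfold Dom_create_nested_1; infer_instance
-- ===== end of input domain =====

-- B replaces the nested multiplication loops by a running-row accumulator (row i = previous row + base row); return value only, no speed claim.
-- ===== PORT A =====
def create_nested_1 (size : Int) : List (List Int) :=
  (PySem.List.pyRange 0 size 1).foldl (fun result i =>
    result ++ [(PySem.List.pyRange 0 size 1).foldl (fun inner j => inner ++ [i * j]) []]) []

-- ===== PORT B =====
def create_nested_1_alt (size : Int) : List (List Int) :=
  ((PySem.List.pyRange 0 size 1).foldl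
    (fun (st : List (List Int) × List Int) _ =>
      (st.1 ++ [st.2], (st.2.zip (PySem.List.pyRange 0 size 1)).map (fun pb => pb.1 + pb.2)))
    (([] : List (List Int)), List.replicate size.toNat 0)).1

-- ===== PRECONDITION & SPEC =====
def Spec_create_nested_1 (size : Int) (out : List (List Int)) : Prop := out = create_nested_1_alt size
instance (size : Int) (out : List (List Int)) : Decidable (Spec_create_nested_1 size out) := by unfold Spec_create_nested_1; infer_instance

-- ===== CLAIM (what is proved, stated in full; the proofs are below) =====
def Claim_equal_create_nested_1 : Prop := ∀ (size : Int), Dom_create_nested_1 size → Spec_create_nested_1 size (create_nested_1 size)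

-- ===== LEMMAS AND PROOFS =====

-- A's inner/outer loops build acc ++ map
theorem foldl_app {α β : Type} (f : α → β) : ∀ (l : List α) (init : List β),
    l.foldl (fun acc x => acc ++ [f x]) init = init ++ l.map f := by
  intro l; induction l with
  | nil => simp
  | cons x xs ih => intro init; simp [List.foldl, ih]

-- element-wise add of base onto (c*·)-row gives the ((c+1)*·)-row
theorem zip_add_step (c : Int) : ∀ (base : List Int),
    ((base.map (fun b => c * b)).zip base).map (fun pb => pb.1 + pb.2)
      = base.map (fun b => (c + 1) * b) := by
  intro base; induction base with
  | nil => rfl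
  | cons b bs ih => simp [ih]; ring

-- invariant of B's loop
theorem alt_loop {α : Type} (base : List Int) :
    ∀ (l : List α) (res : List (List Int)) (c : Int),
    l.foldl (fun (st : List (List Int) × List Int) _ =>
        (st.1 ++ [st.2], (st.2.zip base).map (fun pb => pb.1 + pb.2)))
      (res, base.map (fun b => c * b))
    = (res ++ (List.range l.length).map (fun (i : Nat) => base.map (fun b => (c + (i : Int)) * b)),
       base.map (fun b => (c + (l.length : Int)) * b)) := by
  intro l; induction l with
  | nil => intro res c; simp
  | cons x xs ih =>
    intro res c
    simp only [List.foldl, zip_add_step]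
    rw [ih]
    refine Prod.ext ?_ ?_
    · simp only [List.length_cons, List.range_succ_eq_map, List.map_cons, List.map_map]
      simp only [List.append_assoc, List.singleton_append]
      congr 1
      congr 1
      · apply List.map_congr_left; intro b _; push_cast; ring
      · apply List.map_congr_left; intro k _
        simp only [Function.comp]
        apply List.map_congr_left; intro b _
        push_cast; ring
    · simp only [List.length_cons]
      apply List.map_congr_left; intro b _
      push_cast; ring

theorem replicate_eq_map_zero : ∀ (l : List Int), List.replicate l.length 0 = l.map (fun b => 0 * b) := by
  intro l; induction l with
  | nil => rfl
  | cons b bs ih => simp only [List.length_cons, List.replicate_succ, List.map_cons, ih, zero_mul]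

-- ===== VERDICT =====
theorem create_nested_1_spec : Claim_equal_create_nested_1 := by
  intro size _
  unfold Spec_create_nested_1 create_nested_1 create_nested_1_alt
  have hlen : (PySem.List.pyRange 0 size 1).length = size.toNat := by
    simp [PySem.List.length_pyRange_one]
  rw [← hlen, replicate_eq_map_zero, alt_loop]
  simp only [foldl_app, List.nil_append]
  rw [PySem.List.pyRange_one]
  simp only [List.map_map, Function.comp_def, List.length_map, List.length_range]
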